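-- pv_equiv track=rewrite | github.com/Sitalakshmib/AceIt | AceitBackend/AceitBackend/massive_database.py | get_hr_questions
-- ===== SOURCE A (Python) =====
-- def get_hr_questions(count):
--     """Generate HR interview questions"""
--     base_questions = [
--         "Tell me about yourself",
--         "Why should we hire you?",
--         "What are your strengths and weaknesses?",
--         "Where do you see yourself in 5 years?",
--         "Why do you want to work here?",
--         "Describe a challenging situation and how you handled it",
--         "What are your salary expectations?",
--         "How do you handle pressure?",
--         "What motivates you?",
--         "Why are you leaving your current job?"
--     ]
--
--     questions = []
--     for i in range(count):
--         question_text = base_questions[i % len(base_questions)] + f" (Variant {i//len(base_questions) + 1})"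
--         questions.append({
--             "id": f"hr_{i}",
--             "question": question_text,
--             "topic": "hr_general",
--             "type": "interview",
--             "source": "hr_database"
--         })
--
--     return questions
-- ===== SOURCE B (Python) =====
-- def get_hr_questions(count):
--     """Generate HR interview questions"""
--     base_questions = [
--         "Tell me about yourself",
--         "Why should we hire you?",
--         "What are your strengths and weaknesses?",
--         "Where do you see yourself in 5 years?",
--         "Why do you want to work here?",
--         "Describe a challenging situation and how you handled it",
--         "What are your salary expectations?",
--         "How do you handle pressure?",
--         "What motivates you?",
--         "Why are you leaving your current job?"
--     ]
--     n = len(base_questions)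
--     total = max(count, 0)
--     full_cycles, remainder = divmod(total, n)
--     questions = []
--     i = 0
--     for v in range(full_cycles):
--         for q in base_questions:
--             questions.append({
--                 "id": f"hr_{i}",
--                 "question": q + f" (Variant {v + 1})",
--                 "topic": "hr_general",
--                 "type": "interview",
--                 "source": "hr_database",
--             })
--             i += 1
--     for q in base_questions[:remainder]:
--         questions.append({
--             "id": f"hr_{i}",
--             "question": q + f" (Variant {full_cycles + 1})",
--             "topic": "hr_general",
--             "type": "interview",
--             "source": "hr_database",
--         })
--         i += 1
--     return questions
-- ===== Notes on version B (the rewrite author's own statement) =====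
-- stated objective: alternative
-- what changed: Replaces A's single loop computing i%len and i//len per item with a divmod decomposition: an outer loop emitting the full base list once per full cycle plus a separate partial loop for the remainder, so no per-item modular arithmetic is done.
import Mathlib
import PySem

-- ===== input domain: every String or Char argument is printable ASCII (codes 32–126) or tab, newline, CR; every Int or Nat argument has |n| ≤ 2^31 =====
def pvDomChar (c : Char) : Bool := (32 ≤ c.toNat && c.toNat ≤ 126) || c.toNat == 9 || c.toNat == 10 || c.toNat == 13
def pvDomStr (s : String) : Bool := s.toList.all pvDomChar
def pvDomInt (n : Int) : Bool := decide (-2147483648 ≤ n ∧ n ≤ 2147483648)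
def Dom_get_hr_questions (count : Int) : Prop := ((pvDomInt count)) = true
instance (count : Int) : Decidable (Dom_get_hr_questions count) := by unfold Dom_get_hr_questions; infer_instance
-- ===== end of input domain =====

-- B replaces A's per-item i%len / i//len arithmetic by a divmod decomposition into full
-- cycles over the base list plus a partial remainder pass (objective: alternative).

-- the literal base_questions list, identical in both Python sources
def pvBaseQuestions : List String := [
  "Tell me about yourself",
  "Why should we hire you?",
  "What are your strengths and weaknesses?",
  "Where do you see yourself in 5 years?",
  "Why do you want to work here?",
  "Describe a challenging situation and how you handled it",
  "What are your salary expectations?",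
  "How do you handle pressure?",
  "What motivates you?",
  "Why are you leaving your current job?"]

-- ===== PORT A =====
-- the dict built in A's loop body; pyGetD's default is never used: i % 10 is always in range
def pvItemA (i : Int) : List (String × String) :=
  let question_text :=
    PySem.List.pyGetD pvBaseQuestions (PySem.Int.mod i (pvBaseQuestions.length : Int)) ""
      ++ " (Variant " ++ PySem.Int.toStr (PySem.Int.floordiv i (pvBaseQuestions.length : Int) + 1) ++ ")"
  [("id", "hr_" ++ PySem.Int.toStr i),
   ("question", question_text),
   ("topic", "hr_general"),
   ("type", "interview"),
   ("source", "hr_database")]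

def get_hr_questions (count : Int) : List (List (String × String)) :=
  (PySem.List.pyRange 0 count 1).foldl (fun questions i => questions ++ [pvItemA i]) []

-- ===== PORT B =====
-- the dict built in B's loop bodies
def pvItemB (i : Int) (q : String) (variant : Int) : List (String × String) :=
  [("id", "hr_" ++ PySem.Int.toStr i),
   ("question", q ++ " (Variant " ++ PySem.Int.toStr variant ++ ")"),
   ("topic", "hr_general"),
   ("type", "interview"),
   ("source", "hr_database")]

def get_hr_questions_alt (count : Int) : List (List (String × String)) :=
  let n : Int := (pvBaseQuestions.length : Int)
  let total : Int := max count 0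
  let full_cycles : Int := PySem.Int.floordiv total n
  let remainder : Int := PySem.Int.mod total n
  let st1 : List (List (String × String)) × Int :=
    (PySem.List.pyRange 0 full_cycles 1).foldl
      (fun st v => pvBaseQuestions.foldl
        (fun st q => (st.1 ++ [pvItemB st.2 q (v + 1)], st.2 + 1)) st)
      ([], 0)
  let st2 : List (List (String × String)) × Int :=
    (PySem.List.slice pvBaseQuestions none (some remainder)).foldl
      (fun st q => (st.1 ++ [pvItemB st.2 q (full_cycles + 1)], st.2 + 1)) st1
  st2.1

-- ===== PRECONDITION & SPEC =====
def Spec_get_hr_questions (count : Int) (out : List (List (String × String))) : Prop := out = get_hr_questions_alt count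
instance (count : Int) (out : List (List (String × String))) : Decidable (Spec_get_hr_questions count out) := by unfold Spec_get_hr_questions; infer_instance

-- ===== CLAIM (what is proved, stated in full; the proofs are below) =====
def Claim_equal_get_hr_questions : Prop := ∀ (count : Int), Dom_get_hr_questions count → Spec_get_hr_questions count (get_hr_questions count)

-- ===== LEMMAS AND PROOFS =====

-- A's result is the map of pvItemA over 0..count-1
lemma pvA_eq_map (count : Int) :
    get_hr_questions count = (List.range count.toNat).map (fun k : Nat => pvItemA (k : Int)) := by
  unfold get_hr_questions
  rw [PySem.List.foldl_append_singleton_eq_map, PySem.List.pyRange_one, List.map_map,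
    List.nil_append]
  simp only [Int.sub_zero]
  apply List.map_congr_left
  intro j hj
  simp

-- B's inner loop shape: one pass over l appending one item per element, counter advancing
lemma pvInner_loop (v : Int) (l : List String) (acc : List (List (String × String))) (i : Int) :
    l.foldl (fun st q => (st.1 ++ [pvItemB st.2 q v], st.2 + 1)) (acc, i)
    = (acc ++ (List.range l.length).map (fun j : Nat => pvItemB (i + (j : Int)) (l.getD j "") v),
       i + (l.length : Int)) := by
  induction l generalizing acc i with
  | nil => simp
  | cons q t ih =>
    simp only [List.foldl_cons, ih, List.length_cons]
    refine Prod.ext ?_ ?_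
    · simp only [List.range_succ_eq_map, List.map_cons, List.map_map, List.append_assoc,
        List.singleton_append]
      congr 1
      congr 1
      · simp
      apply List.map_congr_left
      intro j hj
      simp only [Function.comp_apply, List.getD_cons_succ]
      rw [show i + ((j.succ : Nat) : Int) = i + 1 + (j : Int) by push_cast; ring]
    · simp only
      push_cast; ring

-- a full-cycle / remainder item of B equals A's item at global index 10*v+j
lemma pvItem_eq (v j : Nat) (hj : j < 10) :
    pvItemB (((10 * v + j : Nat)) : Int) (pvBaseQuestions.getD j "") ((v : Int) + 1)
    = pvItemA ((10 * v + j : Nat) : Int) := by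
  have hL : pvBaseQuestions.length = 10 := rfl
  simp only [pvItemA, pvItemB, hL, PySem.Int.mod_natCast, PySem.Int.floordiv_natCast,
    PySem.List.pyGetD_natCast]
  rw [show (10 * v + j) % 10 = j by omega, show (10 * v + j) / 10 = v by omega]

-- B's outer loop produces exactly the first 10*f items of A's sequence
lemma pvOuter_loop (f : Nat) :
    (PySem.List.pyRange 0 (f : Int) 1).foldl
      (fun st v => pvBaseQuestions.foldl
        (fun st q => (st.1 ++ [pvItemB st.2 q (v + 1)], st.2 + 1)) st)
      ([], 0)
    = ((List.range (10 * f)).map (fun k : Nat => pvItemA (k : Int)), ((10 * f : Nat) : Int)) := by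
  induction f with
  | zero => simp
  | succ f ih =>
    have hr : (PySem.List.pyRange 0 ((f + 1 : Nat) : Int) 1)
        = PySem.List.pyRange 0 (f : Int) 1 ++ [(f : Int)] := by
      rw [show ((f + 1 : Nat) : Int) = (f : Int) + 1 by push_cast; ring,
        PySem.List.pyRange_one_succ_right (Int.natCast_nonneg f)]
    rw [hr, List.foldl_append, ih, List.foldl_cons, List.foldl_nil, pvInner_loop]
    refine Prod.ext ?_ ?_
    · simp only
      rw [show 10 * (f + 1) = 10 * f + 10 by ring, List.range_add, List.map_append]
      congr 1
      rw [List.map_map]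
      apply List.map_congr_left
      intro j hj
      simp only [List.mem_range] at hj
      have h := pvItem_eq f j hj
      have hc : ((10 * f + j : Nat) : Int) = ((10 * f : Nat) : Int) + (j : Int) := by
        push_cast; ring
      rw [hc] at h
      simpa [Function.comp_def] using h
    · simp only
      rw [show pvBaseQuestions.length = 10 from rfl]
      push_cast; ring

-- ===== VERDICT (by name: the statement is the Claim_ definition above) =====
theorem get_hr_questions_spec : Claim_equal_get_hr_questions := by
  intro count _
  show get_hr_questions count = get_hr_questions_alt count
  rw [pvA_eq_map]
  have hmax : max count 0 = ((count.toNat : Nat) : Int) := by omega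
  have hL : pvBaseQuestions.length = 10 := rfl
  simp only [get_hr_questions_alt, hmax, hL, PySem.Int.mod_natCast, PySem.Int.floordiv_natCast,
    PySem.List.slice_to_natCast]
  rw [pvOuter_loop (count.toNat / 10), pvInner_loop]
  simp only
  set N := count.toNat with hN
  have htake : (pvBaseQuestions.take (N % 10)).length = N % 10 := by
    rw [List.length_take, hL]; omega
  rw [htake]
  conv_lhs => rw [show N = 10 * (N / 10) + N % 10 by omega]
  rw [List.range_add, List.map_append]
  congr 1
  rw [List.map_map]
  apply List.map_congr_left
  intro j hj
  simp only [List.mem_range] at hj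
  have hj10 : j < 10 := by omega
  have hget : (pvBaseQuestions.take (N % 10)).getD j "" = pvBaseQuestions.getD j "" := by
    simp [List.getD, hj]
  simp only [Function.comp_apply]
  rw [show ((10 * (N / 10) : Nat) : Int) + (j : Int) = ((10 * (N / 10) + j : Nat) : Int) from by
    push_cast; ring]
  rw [hget]
  exact (pvItem_eq (N / 10) j hj10).symm
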